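-- pv_equiv track=rewrite | github.com/mango606/baekjoon-hub | 백준/Bronze/1032. 명령 프롬프트/명령 프롬프트.py | find_common_pattern
-- ===== SOURCE A (Python) =====
-- def find_common_pattern(filenames):
--     n = len(filenames)
--     length = len(filenames[0])
--     pattern = list(filenames[0])  # 첫 번째 파일명을 패턴으로 초기화
--
--     for i in range(1, n):  # 첫 번째 파일명을 제외한 나머지 파일명을 순회
--         for j in range(length):
--             if pattern[j] != filenames[i][j]:  # 현재 위치의 문자가 다르면 '?'로 변경
--                 pattern[j] = '?'
--
--     return ''.join(pattern)  # 리스트를 문자열로 변환하여 반환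
-- ===== SOURCE B (Python) =====
-- def find_common_pattern(filenames):
--     return ''.join(col[0] if len(set(col)) == 1 else '?' for col in zip(*filenames))
-- ===== Notes on version B (the rewrite author's own statement) =====
-- stated objective: idiomatic
-- what changed: Transposes the filenames into character columns with zip(*filenames) and maps each column to its sole character if the column's set is a singleton, else '?' - no indexing, no length bookkeeping, no mutable pattern list.
import Mathlib
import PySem

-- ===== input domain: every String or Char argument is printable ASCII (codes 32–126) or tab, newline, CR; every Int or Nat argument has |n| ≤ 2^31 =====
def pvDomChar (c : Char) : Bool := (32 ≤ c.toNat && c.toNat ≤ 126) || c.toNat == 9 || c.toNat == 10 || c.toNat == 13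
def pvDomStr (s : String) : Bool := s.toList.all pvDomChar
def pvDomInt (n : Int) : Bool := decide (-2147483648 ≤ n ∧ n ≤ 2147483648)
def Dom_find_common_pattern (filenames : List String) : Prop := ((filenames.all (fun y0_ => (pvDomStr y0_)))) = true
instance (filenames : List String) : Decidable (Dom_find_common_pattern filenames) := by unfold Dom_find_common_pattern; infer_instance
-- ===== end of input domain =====

-- B replaces A's nested index loops mutating a pattern list by transposing the filenames
-- into character columns (zip(*filenames)) and mapping each column through a set test (idiomatic).

-- ===== PORT A =====
-- literal port of A: ''.join over a list of single characters is String.ofList;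
-- the pyGetD defaults are exact under Pre_ (all indices are then in range).
def find_common_pattern (filenames : List String) : String :=
  let n : Int := PySem.List.len filenames
  let first : String := PySem.List.pyGetD filenames 0 ""
  let length : Int := PySem.Str.len first
  let pattern : List Char := first.toList
  let final : List Char :=
    (PySem.List.pyRange 1 n 1).foldl (fun pat i =>
      (PySem.List.pyRange 0 length 1).foldl (fun pat j =>
        if PySem.List.pyGetD pat j ' ' ≠
            PySem.List.pyGetD (PySem.List.pyGetD filenames i "").toList j ' '
        then PySem.List.pySetD pat j '?' else pat) pat) pattern
  String.ofList final

-- ===== PORT B =====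
-- pvTranspose is zip(*rows): columns until some row is exhausted (Python zip truncates).
-- The first row's length is a fuel bound, not part of the algorithm: each step shortens the
-- first row by one, and once it is empty the guard stops the recursion anyway.
def pvTransposeGo : Nat → List (List Char) → List (List Char)
  | 0, _ => []
  | fuel + 1, rows =>
    if rows.isEmpty ∨ rows.any (·.isEmpty) then []
    else (rows.map (fun r => r.headD ' ')) :: pvTransposeGo fuel (rows.map (fun r => r.tail))

def pvTranspose (rows : List (List Char)) : List (List Char) :=
  pvTransposeGo (rows.headD []).length rows

-- literal port of Source B: ''.join of the generator over zip(*filenames) is String.ofList of the map;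
-- col[0] is col.headD '?' — every produced column is nonempty, so the default is never read.
def find_common_pattern_alt (filenames : List String) : String :=
  String.ofList ((pvTranspose (filenames.map String.toList)).map (fun col =>
    if PySem.Set.len (PySem.Set.ofList col) == 1 then col.headD '?' else '?'))

-- ===== PRECONDITION & SPEC =====
-- Pre_ excludes exactly the inputs where A raises IndexError: the empty list
-- (filenames[0]) and lists where some later filename is shorter than the first
-- (filenames[i][j] for some j < len(filenames[0])).
def Pre_find_common_pattern (filenames : List String) : Prop :=
  filenames ≠ [] ∧ ∀ f ∈ filenames, (filenames.headD "").toList.length ≤ f.toList.length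
instance (filenames : List String) : Decidable (Pre_find_common_pattern filenames) := by
  unfold Pre_find_common_pattern; infer_instance
def pvWitness_find_common_pattern : List String := ["a.txt", "bqtxt"]
def Spec_find_common_pattern (filenames : List String) (out : String) : Prop := out = find_common_pattern_alt filenames
instance (filenames : List String) (out : String) : Decidable (Spec_find_common_pattern filenames out) := by unfold Spec_find_common_pattern; infer_instance

-- ===== CLAIM (what is proved, stated in full; the proofs are below) =====
def Claim_equal_find_common_pattern : Prop := ∀ (filenames : List String), Dom_find_common_pattern filenames → Pre_find_common_pattern filenames → Spec_find_common_pattern filenames (find_common_pattern filenames)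

-- ===== LEMMAS AND PROOFS =====

def pvInner (cs : List Char) (pat : List Char) (j : Int) : List Char :=
  if PySem.List.pyGetD pat j ' ' ≠ PySem.List.pyGetD cs j ' '
  then PySem.List.pySetD pat j '?' else pat

lemma pvInner_step_getD (cs pat : List Char) (a : Int) (k : Nat)
    (ha : 0 ≤ a) (hk : k < pat.length) :
    (pvInner cs pat a).getD k ' ' =
      if (k : Int) = a ∧ pat.getD k ' ' ≠ PySem.List.pyGetD cs (k : Int) ' '
      then '?' else pat.getD k ' ' := by
  unfold pvInner
  rw [PySem.List.pyGetD_of_nonneg pat ' ' ha, PySem.List.pySetD_of_nonneg pat '?' ha]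
  by_cases hka : (k : Int) = a
  · have ha' : a = (k : Int) := hka.symm
    subst ha'
    simp only [Int.toNat_natCast]
    split_ifs with h1 h2 h3
    · rw [List.getD_eq_getElem _ _ (by simpa using hk), List.getElem_set_self]
    · exact absurd ⟨trivial, h1⟩ h2
    · exact absurd h3.2 h1
    · rfl
  · have hta : a.toNat ≠ k := by omega
    have hr : ¬((k : Int) = a ∧ pat.getD k ' ' ≠ PySem.List.pyGetD cs (k : Int) ' ') :=
      fun h => hka h.1
    rw [if_neg hr]
    split
    · simp [List.getD, hta]
    · rfl

lemma pvInner_len1 (cs pat : List Char) (a : Int) : (pvInner cs pat a).length = pat.length := by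
  unfold pvInner; split
  · exact PySem.List.length_pySetD pat a '?'
  · rfl

lemma pvInner_getD (cs : List Char) (m : Nat) :
    ∀ (a : Int) (pat : List Char) (k : Nat), 0 ≤ a → k < pat.length →
    ((PySem.List.pyRange a (a + m) 1).foldl (pvInner cs) pat).getD k ' ' =
      (if a ≤ (k : Int) ∧ (k : Int) < a + m ∧
          pat.getD k ' ' ≠ PySem.List.pyGetD cs (k : Int) ' '
       then '?' else pat.getD k ' ') := by
  induction m with
  | zero =>
    intro a pat k ha hk
    rw [PySem.List.pyRange_one_eq_nil (by omega), if_neg (by omega)]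
    rfl
  | succ m ih =>
    intro a pat k ha hk
    rw [PySem.List.pyRange_one_cons (by omega), List.foldl_cons]
    have hk1 : k < (pvInner cs pat a).length := by rw [pvInner_len1]; exact hk
    have hIH := ih (a + 1) (pvInner cs pat a) k (by omega) hk1
    have hcast : a + 1 + (m : Int) = a + ((m : Nat) + 1 : Nat) := by push_cast; ring
    rw [hcast] at hIH
    rw [hIH]
    have hstep := pvInner_step_getD cs pat a k ha hk
    by_cases hka : (k : Int) = a
    · by_cases hne : pat.getD k ' ' ≠ PySem.List.pyGetD cs (k : Int) ' '
      · have h1 : (pvInner cs pat a).getD k ' ' = '?' := by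
          rw [hstep, if_pos ⟨hka, hne⟩]
        rw [h1, ite_self, if_pos ⟨by omega, by push_cast; omega, hne⟩]
      · have h1 : (pvInner cs pat a).getD k ' ' = pat.getD k ' ' := by
          rw [hstep, if_neg (fun h => hne h.2)]
        rw [h1, if_neg (fun h => hne h.2.2), if_neg (fun h => hne h.2.2)]
    · have h1 : (pvInner cs pat a).getD k ' ' = pat.getD k ' ' := by
        rw [hstep, if_neg (fun h => hka h.1)]
      rw [h1]
      split_ifs with h1 h2 h3
      · rfl
      · exact absurd ⟨by omega, h1.2.1, h1.2.2⟩ h2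
      · exact absurd ⟨by omega, h3.2.1, h3.2.2⟩ h1
      · rfl

def pvOuter (filenames : List String) (length : Int) (pat : List Char) (i : Int) : List Char :=
  (PySem.List.pyRange 0 length 1).foldl
    (pvInner (PySem.List.pyGetD filenames i "").toList) pat

lemma pvOuter_len1 (filenames : List String) (length : Int) (pat : List Char) (i : Int) :
    (pvOuter filenames length pat i).length = pat.length := by
  unfold pvOuter
  induction (PySem.List.pyRange 0 length 1) generalizing pat with
  | nil => rfl
  | cons j js ih => rw [List.foldl_cons, ih, pvInner_len1]

lemma pvOuter_step_getD (filenames : List String) (length : Int) (pat : List Char)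
    (i : Int) (k : Nat) (hk : k < pat.length) (hlen : (pat.length : Int) = length) :
    (pvOuter filenames length pat i).getD k ' ' =
      if pat.getD k ' ' =
          PySem.List.pyGetD (PySem.List.pyGetD filenames i "").toList (k : Int) ' '
      then pat.getD k ' ' else '?' := by
  unfold pvOuter
  rw [show length = 0 + ((pat.length : Nat) : Int) by omega]
  rw [pvInner_getD _ pat.length 0 pat k (le_refl 0) hk]
  by_cases hne : pat.getD k ' ' =
      PySem.List.pyGetD (PySem.List.pyGetD filenames i "").toList (k : Int) ' '
  · rw [if_neg (fun h => h.2.2 hne), if_pos hne]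
  · rw [if_pos ⟨by omega, by omega, hne⟩, if_neg hne]

lemma pvOuter_getD (filenames : List String) (length : Int) (is : List Int) :
    ∀ (pat : List Char) (k : Nat), k < pat.length → (pat.length : Int) = length →
    ((is.foldl (pvOuter filenames length) pat).getD k ' ' =
      if ∀ i ∈ is,
          PySem.List.pyGetD (PySem.List.pyGetD filenames i "").toList (k : Int) ' '
            = pat.getD k ' '
      then pat.getD k ' ' else '?') := by
  induction is with
  | nil => intro pat k hk hlen; simp
  | cons i is ih =>
    intro pat k hk hlen
    rw [List.foldl_cons]
    have hk1 : k < (pvOuter filenames length pat i).length := by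
      rw [pvOuter_len1]; exact hk
    have hlen1 : ((pvOuter filenames length pat i).length : Int) = length := by
      rw [pvOuter_len1]; exact hlen
    rw [ih (pvOuter filenames length pat i) k hk1 hlen1,
        pvOuter_step_getD filenames length pat i k hk hlen]
    by_cases hne : pat.getD k ' ' =
        PySem.List.pyGetD (PySem.List.pyGetD filenames i "").toList (k : Int) ' '
    · rw [if_pos hne]
      simp only [List.forall_mem_cons]
      split_ifs with h1 h2 h3
      · rfl
      · exact absurd ⟨hne.symm, h1⟩ h2
      · exact absurd h3.2 h1
      · rfl
    · rw [if_neg hne, ite_self,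
          if_neg (fun h => hne ((List.forall_mem_cons.mp h).1.symm))]

lemma pvOuter_foldl_len (filenames : List String) (length : Int) (is : List Int)
    (pat : List Char) :
    (is.foldl (pvOuter filenames length) pat).length = pat.length := by
  induction is generalizing pat with
  | nil => rfl
  | cons i is ih => rw [List.foldl_cons, ih, pvOuter_len1]

-- B side: the transpose unrolled into explicit columns when the first row is shortest.
lemma pvTransposeGo_eq (n : Nat) :
    ∀ rows : List (List Char), rows ≠ [] →
    (rows.headD []).length = n → (∀ r ∈ rows, n ≤ r.length) →
    pvTransposeGo n rows =
      (List.range n).map (fun k => rows.map (fun r => r.getD k ' ')) := by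
  induction n with
  | zero =>
    intro rows hne hhd _
    simp [pvTransposeGo]
  | succ n ih =>
    intro rows hne hhd hall
    cases rows with
    | nil => exact absurd rfl hne
    | cons r0 rs =>
      have hnonempty : ∀ r ∈ (r0 :: rs), r ≠ [] := by
        intro r hr hnil
        have := hall r hr
        simp [hnil] at this
      have hguard : ¬(((r0 :: rs).isEmpty : Prop) ∨ ((r0 :: rs).any (·.isEmpty) : Prop)) := by
        rintro (h | h)
        · simp at h
        · rw [List.any_eq_true] at h
          obtain ⟨r, hr, hre⟩ := h
          exact hnonempty r hr (by simpa using hre)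
      rw [pvTransposeGo, if_neg hguard]
      have hhd' : r0.length = n + 1 := by simpa using hhd
      have hIH := ih ((r0 :: rs).map (fun r => r.tail))
        (by simp)
        (by
          simp only [List.map_cons, List.headD_cons, List.length_tail]
          omega)
        (by
          intro r' hr'
          obtain ⟨r, hr, rfl⟩ := List.mem_map.mp hr'
          have := hall r hr
          rw [List.length_tail]
          omega)
      rw [hIH, List.range_succ_eq_map, List.map_cons]
      congr 1
      · show List.map (fun r => r.headD ' ') (r0 :: rs) =
            List.map (fun r => r.getD 0 ' ') (r0 :: rs)
        apply List.map_congr_left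
        intro r hr
        cases r with
        | nil => exact absurd rfl (hnonempty [] hr)
        | cons c cs => rfl
      · rw [List.map_map]
        apply List.map_congr_left
        intro k _
        show List.map (fun r => r.getD k ' ') (List.map (fun r => r.tail) (r0 :: rs)) =
            List.map (fun r => r.getD (k + 1) ' ') (r0 :: rs)
        rw [List.map_map]
        apply List.map_congr_left
        intro r hr
        cases r with
        | nil => exact absurd rfl (hnonempty [] hr)
        | cons c cs => rfl

lemma pvTranspose_eq (n : Nat) (rows : List (List Char)) (hne : rows ≠ [])
    (hhd : (rows.headD []).length = n) (hall : ∀ r ∈ rows, n ≤ r.length) :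
    pvTranspose rows =
      (List.range n).map (fun k => rows.map (fun r => r.getD k ' ')) := by
  rw [pvTranspose, hhd]
  exact pvTransposeGo_eq n rows hne hhd hall

-- set(col) is a singleton iff every element of the column equals its head.
lemma pvFoldl_add_self (c : Char) : ∀ xs : List Char, (∀ x ∈ xs, x = c) →
    xs.foldl PySem.Set.add [c] = [c] := by
  intro xs
  induction xs with
  | nil => intro _; rfl
  | cons x t ih =>
    intro hall
    rw [List.foldl_cons, hall x List.mem_cons_self,
        show PySem.Set.add [c] c = [c] by simp [PySem.Set.add]]
    exact ih (fun y hy => hall y (List.mem_cons_of_mem x hy))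

lemma pvSet_singleton_iff (c : Char) (rest : List Char) :
    (PySem.Set.len (PySem.Set.ofList (c :: rest)) == 1) = true ↔ ∀ x ∈ rest, x = c := by
  rw [beq_iff_eq]
  constructor
  · intro h1 x hx
    have hlen : (PySem.Set.ofList (c :: rest)).length = 1 := by
      have := h1
      simp only [PySem.Set.len] at this
      exact_mod_cast this
    obtain ⟨y, hy⟩ := List.length_eq_one_iff.mp hlen
    have hmx : x ∈ PySem.Set.ofList (c :: rest) :=
      (PySem.Set.mem_ofList _ _).mpr (List.mem_cons_of_mem c hx)
    have hmc : c ∈ PySem.Set.ofList (c :: rest) :=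
      (PySem.Set.mem_ofList _ _).mpr List.mem_cons_self
    rw [hy] at hmx hmc
    simp at hmx hmc
    rw [hmx, hmc]
  · intro hall
    have h : PySem.Set.ofList (c :: rest) = [c] := by
      rw [PySem.Set.ofList_eq_foldl, List.foldl_cons,
          show PySem.Set.add ([] : List Char) c = [c] by simp [PySem.Set.add]]
      exact pvFoldl_add_self c rest hall
    rw [h]
    rfl

-- ===== VERDICT (by name: the statement is the Claim_ definition above) =====
theorem find_common_pattern_spec : Claim_equal_find_common_pattern := by
  intro filenames _hDom hPre
  unfold Spec_find_common_pattern
  obtain ⟨hne, hlen⟩ := hPre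
  cases filenames with
  | nil => exact absurd rfl hne
  | cons f0 fs =>
    have hlen' : ∀ f ∈ (f0 :: fs), f0.toList.length ≤ f.toList.length := by
      simpa using hlen
    have hfirst : PySem.List.pyGetD (f0 :: fs) 0 "" = f0 :=
      PySem.List.pyGetD_zero_cons f0 fs ""
    -- A side: foldl of pvOuter
    have hA : find_common_pattern (f0 :: fs) =
        String.ofList ((PySem.List.pyRange 1 (PySem.List.len (f0 :: fs)) 1).foldl
          (pvOuter (f0 :: fs) (PySem.Str.len (PySem.List.pyGetD (f0 :: fs) 0 "")))
          (PySem.List.pyGetD (f0 :: fs) 0 "").toList) := rfl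
    -- B side: transpose unrolled
    have hT := pvTranspose_eq f0.toList.length ((f0 :: fs).map String.toList)
      (by simp)
      (by simp)
      (by
        intro r hr
        obtain ⟨f, hf, rfl⟩ := List.mem_map.mp hr
        exact hlen' f hf)
    have hB : find_common_pattern_alt (f0 :: fs) =
        String.ofList ((List.range f0.toList.length).map (fun k =>
          (fun col =>
            if PySem.Set.len (PySem.Set.ofList col) == 1 then col.headD '?' else '?')
          (((f0 :: fs).map String.toList).map (fun r => r.getD k ' ')))) := by
      unfold find_common_pattern_alt
      rw [hT, List.map_map]
      rfl
    rw [hA, hB, hfirst]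
    apply congrArg String.ofList
    have hLA : ((PySem.List.pyRange 1 (PySem.List.len (f0 :: fs)) 1).foldl
        (pvOuter (f0 :: fs) (PySem.Str.len f0)) f0.toList).length = f0.toList.length :=
      pvOuter_foldl_len _ _ _ _
    apply List.ext_getElem
    · rw [hLA, List.length_map, List.length_range]
    · intro k hk1 hk2
      have hk : k < f0.toList.length := by rwa [hLA] at hk1
      -- A side: getElem -> getD, then the loop characterisation
      rw [← List.getD_eq_getElem _ ' ' hk1]
      rw [pvOuter_getD (f0 :: fs) (PySem.Str.len f0) _ f0.toList k hk
            (by rw [PySem.Str.len_eq])]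
      -- B side: the k-th column
      rw [List.getElem_map, List.getElem_range, List.map_map,
          show ((fun r => List.getD r k ' ') ∘ String.toList) =
            (fun f : String => f.toList.getD k ' ') from rfl,
          List.map_cons]
      -- bridge the two conditions
      have hcond : (∀ i ∈ PySem.List.pyRange 1 (PySem.List.len (f0 :: fs)) 1,
            PySem.List.pyGetD (PySem.List.pyGetD (f0 :: fs) i "").toList (k : Int) ' '
              = f0.toList.getD k ' ') ↔
          (∀ x ∈ fs.map (fun f => f.toList.getD k ' '), x = f0.toList.getD k ' ') := by
        rw [List.forall_mem_map]
        constructor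
        · intro h f hf
          obtain ⟨j, hj, rfl⟩ := List.getElem_of_mem hf
          have hmem : (((j + 1 : Nat)) : Int) ∈
              PySem.List.pyRange 1 (PySem.List.len (f0 :: fs)) 1 := by
            rw [PySem.List.mem_pyRange_one, PySem.List.len_eq]
            constructor <;> [exact_mod_cast Nat.succ_le_succ (Nat.zero_le j);
              (push_cast; simp; omega)]
          have hgi : PySem.List.pyGetD (f0 :: fs) (((j + 1 : Nat)) : Int) "" = fs[j] := by
            rw [PySem.List.pyGetD_eq_getElem _ _ (by omega) (by simp; omega)]
            simp
          have hmth := h _ hmem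
          rw [hgi, PySem.List.pyGetD_natCast] at hmth
          exact hmth
        · intro h i hi
          rw [PySem.List.mem_pyRange_one, PySem.List.len_eq] at hi
          obtain ⟨hi1, hi2⟩ := hi
          have hlt : i.toNat < (f0 :: fs).length := by omega
          have h1 : PySem.List.pyGetD (f0 :: fs) i "" = (f0 :: fs)[i.toNat]'hlt :=
            PySem.List.pyGetD_eq_getElem _ _ (by omega) hi2
          have hlt' : i.toNat - 1 < fs.length := by
            simp at hlt
            omega
          have h2 : (f0 :: fs)[i.toNat]'hlt = fs[i.toNat - 1]'hlt' := by
            rw [List.getElem_cons]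
            rw [dif_neg (by omega)]
          rw [h1, h2, PySem.List.pyGetD_natCast]
          exact h _ (List.getElem_mem hlt')
      beta_reduce
      by_cases hc : ∀ i ∈ PySem.List.pyRange 1 (PySem.List.len (f0 :: fs)) 1,
          PySem.List.pyGetD (PySem.List.pyGetD (f0 :: fs) i "").toList (k : Int) ' '
            = f0.toList.getD k ' '
      · rw [if_pos hc,
            if_pos ((pvSet_singleton_iff _ _).mpr (hcond.mp hc))]
        rfl
      · rw [if_neg hc,
            if_neg (fun h => hc (hcond.mpr ((pvSet_singleton_iff _ _).mp h)))]
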